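-- pv_equiv track=rewrite | github.com/levante-framework/levante_translations | utilities/itembank_by_task_regen_report.py | resolve_voice_service
-- ===== SOURCE A (Python) =====
-- from typing import Dict, Iterable, List, Optional, Tuple
--
-- def resolve_voice_service(language_map: Dict[str, Dict[str, str]], lang_code: str) -> Tuple[str, str]:
--     for cfg in language_map.values():
--         if cfg.get("lang_code") == lang_code:
--             return cfg.get("voice", ""), cfg.get("service", "")
--
--     # Fallback to base-language match (e.g., es-AR -> es-CO)
--     base = (lang_code or "").split("-")[0]
--     for cfg in language_map.values():
--         cfg_code = cfg.get("lang_code", "")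
--         if cfg_code.split("-")[0] == base:
--             return cfg.get("voice", ""), cfg.get("service", "")
--
--     return "", ""
-- ===== SOURCE B (Python) =====
-- def resolve_voice_service(language_map, lang_code):
--     # Build first-wins indexes once, then answer by two O(1) lookups.
--     exact = {}
--     by_base = {}
--     for cfg in language_map.values():
--         k = cfg.get("lang_code")
--         if k not in exact:
--             exact[k] = cfg
--         b = cfg.get("lang_code", "").split("-")[0]
--         if b not in by_base:
--             by_base[b] = cfg
--     cfg = exact.get(lang_code)
--     if cfg is None:
--         cfg = by_base.get((lang_code or "").split("-")[0])
--     if cfg is None: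
--         return "", ""
--     return cfg.get("voice", ""), cfg.get("service", "")
-- ===== Notes on version B (the rewrite author's own statement) =====
-- stated objective: alternative
-- what changed: B builds two first-wins hash indexes (exact lang_code and base language) in one pass and answers by dictionary lookups, instead of A's two sequential linear scans with early returns.
import Mathlib
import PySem

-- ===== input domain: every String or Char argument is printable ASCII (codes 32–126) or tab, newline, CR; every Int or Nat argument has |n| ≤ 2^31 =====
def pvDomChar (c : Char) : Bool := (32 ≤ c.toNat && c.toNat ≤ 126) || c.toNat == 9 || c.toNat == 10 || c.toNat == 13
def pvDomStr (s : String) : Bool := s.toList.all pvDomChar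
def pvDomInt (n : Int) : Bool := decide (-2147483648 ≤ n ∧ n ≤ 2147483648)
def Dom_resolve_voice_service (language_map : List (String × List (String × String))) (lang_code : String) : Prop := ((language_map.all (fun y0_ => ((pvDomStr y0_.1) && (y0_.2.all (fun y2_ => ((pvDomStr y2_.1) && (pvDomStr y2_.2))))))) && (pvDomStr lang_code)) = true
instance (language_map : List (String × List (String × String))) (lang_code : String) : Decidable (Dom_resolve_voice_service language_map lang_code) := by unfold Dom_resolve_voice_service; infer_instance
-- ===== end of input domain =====

-- B builds two first-wins hash indexes (exact lang_code, base language) in one pass and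
-- answers by dictionary lookups, instead of A's two sequential scans with early returns.

-- ===== PORT A =====
-- cfg.get("voice", ""), cfg.get("service", "")
def pvOutA (cfg : List (String × String)) : String × String :=
  (PySem.Dict.getD (PySem.Dict.mk cfg) "voice" "",
   PySem.Dict.getD (PySem.Dict.mk cfg) "service" "")

-- first loop of A: exact lang_code match (cfg.get("lang_code") may be absent → None)
def pvLoopExact (cfgs : List (List (String × String))) (lang_code : String) :
    Option (String × String) :=
  match cfgs with
  | [] => none
  | cfg :: rest =>
    if PySem.Dict.get? (PySem.Dict.mk cfg) "lang_code" = some lang_code then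
      some (pvOutA cfg)
    else pvLoopExact rest lang_code

-- second loop of A: base-language match on cfg.get("lang_code", "").split("-")[0]
def pvLoopBase (cfgs : List (List (String × String))) (base : String) :
    Option (String × String) :=
  match cfgs with
  | [] => none
  | cfg :: rest =>
    if ((PySem.Str.split? (PySem.Dict.getD (PySem.Dict.mk cfg) "lang_code" "") "-").getD []).headD "" = base then
      some (pvOutA cfg)
    else pvLoopBase rest base

def resolve_voice_service (language_map : List (String × List (String × String))) (lang_code : String) : String × String :=
  match pvLoopExact (language_map.map Prod.snd) lang_code with
  | some r => r
  | none =>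
    -- base = (lang_code or "").split("-")[0]
    let base := ((PySem.Str.split? (if lang_code = "" then "" else lang_code) "-").getD []).headD ""
    match pvLoopBase (language_map.map Prod.snd) base with
    | some r => r
    | none => ("", "")

-- ===== PORT B =====
-- k = cfg.get("lang_code")   (Optional[str] → Option String)
def pvKeyE (cfg : List (String × String)) : Option String :=
  PySem.Dict.get? (PySem.Dict.mk cfg) "lang_code"

-- b = cfg.get("lang_code", "").split("-")[0]
def pvKeyB (cfg : List (String × String)) : String :=
  ((PySem.Str.split? (PySem.Dict.getD (PySem.Dict.mk cfg) "lang_code" "") "-").getD []).headD ""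

-- one step of B's index-building loop: first-wins insert into both dicts
def pvAltStep
    (p : PySem.Dict (Option String) (List (String × String)) × PySem.Dict String (List (String × String)))
    (cfg : List (String × String)) :
    PySem.Dict (Option String) (List (String × String)) × PySem.Dict String (List (String × String)) :=
  ((if p.1.contains (pvKeyE cfg) then p.1 else p.1.insert (pvKeyE cfg) cfg),
   (if p.2.contains (pvKeyB cfg) then p.2 else p.2.insert (pvKeyB cfg) cfg))

def resolve_voice_service_alt (language_map : List (String × List (String × String))) (lang_code : String) : String × String :=
  let idx := (language_map.map Prod.snd).foldl pvAltStep (PySem.Dict.empty, PySem.Dict.empty)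
  let hit :=
    match idx.1.get? (some lang_code) with
    | some c => some c
    | none =>
      idx.2.get? (((PySem.Str.split? (if lang_code = "" then "" else lang_code) "-").getD []).headD "")
  match hit with
  | some cfg =>
    (PySem.Dict.getD (PySem.Dict.mk cfg) "voice" "",
     PySem.Dict.getD (PySem.Dict.mk cfg) "service" "")
  | none => ("", "")

-- ===== PRECONDITION & SPEC =====
def Spec_resolve_voice_service (language_map : List (String × List (String × String))) (lang_code : String) (out : String × String) : Prop := out = resolve_voice_service_alt language_map lang_code
instance (language_map : List (String × List (String × String))) (lang_code : String) (out : String × String) : Decidable (Spec_resolve_voice_service language_map lang_code out) := by unfold Spec_resolve_voice_service; infer_instance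

-- ===== CLAIM (what is proved, stated in full; the proofs are below) =====
def Claim_equal_resolve_voice_service : Prop := ∀ (language_map : List (String × List (String × String))) (lang_code : String), Dom_resolve_voice_service language_map lang_code → Spec_resolve_voice_service language_map lang_code (resolve_voice_service language_map lang_code)

-- ===== LEMMAS AND PROOFS =====

-- B's paired fold splits into two independent first-wins folds.
theorem pvFoldPair (l : List (List (String × String)))
    (d1 : PySem.Dict (Option String) (List (String × String)))
    (d2 : PySem.Dict String (List (String × String))) :
    l.foldl pvAltStep (d1, d2) =
      (l.foldl (fun d c => if d.contains (pvKeyE c) then d else d.insert (pvKeyE c) c) d1,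
       l.foldl (fun d c => if d.contains (pvKeyB c) then d else d.insert (pvKeyB c) c) d2) := by
  induction l generalizing d1 d2 with
  | nil => rfl
  | cons c t ih => simp [pvAltStep, ih]

-- Lookup in a first-wins index = the first element of the list whose key matches.
theorem pvGet?_firstwins {κ α : Type} [BEq κ] [LawfulBEq κ] [DecidableEq κ]
    (key : α → κ) (l : List α) (d : PySem.Dict κ α) (k : κ) :
    (l.foldl (fun d c => if d.contains (key c) then d else d.insert (key c) c) d).get? k
      = (d.get? k).or (l.find? (fun c => key c == k)) := by
  induction l generalizing d with
  | nil => simp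
  | cons c t ih =>
    simp only [List.foldl_cons, List.find?]
    by_cases hk : key c = k
    · subst hk
      by_cases hc : d.contains (key c) = true
      · have hs : (d.get? (key c)).isSome := by
          rw [← PySem.Dict.contains_eq_isSome_get?]; exact hc
        obtain ⟨v, hv⟩ := Option.isSome_iff_exists.mp hs
        simp [hc, ih, hv]
      · have hn : d.get? (key c) = none := by
          rw [PySem.Dict.get?_eq_none_iff_contains]
          exact Bool.not_eq_true _ ▸ hc
        simp [hc, ih, hn, PySem.Dict.get?_insert_self]
    · have hne : (key c == k) = false := by simp [hk]
      have hks : k ≠ key c := Ne.symm hk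
      by_cases hc : d.contains (key c) = true <;>
        simp [hc, ih, hne, PySem.Dict.get?_insert, hks]

-- A's exact scan, expressed as find?.
theorem pvLoopExact_eq_find? (cfgs : List (List (String × String))) (lc : String) :
    pvLoopExact cfgs lc
      = (cfgs.find? (fun c => pvKeyE c == some lc)).map pvOutA := by
  induction cfgs with
  | nil => rfl
  | cons c t ih =>
    by_cases h : PySem.Dict.get? (PySem.Dict.mk c) "lang_code" = some lc
    · rw [List.find?_cons_of_pos (by simp [pvKeyE, h])]
      simp [pvLoopExact, h]
    · rw [List.find?_cons_of_neg (by simp [pvKeyE, h])]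
      simp [pvLoopExact, h, ih]

-- A's base scan, expressed as find?.
theorem pvLoopBase_eq_find? (cfgs : List (List (String × String))) (base : String) :
    pvLoopBase cfgs base
      = (cfgs.find? (fun c => pvKeyB c == base)).map pvOutA := by
  induction cfgs with
  | nil => rfl
  | cons c t ih =>
    by_cases h : ((PySem.Str.split? (PySem.Dict.getD (PySem.Dict.mk c) "lang_code" "") "-").getD []).head?.getD "" = base
    · rw [List.find?_cons_of_pos (by simp [pvKeyB, h])]
      simp [pvLoopBase, h]
    · rw [List.find?_cons_of_neg (by simp [pvKeyB, h])]
      simp [pvLoopBase, h, ih]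

-- ===== VERDICT (by name: the statement is the Claim_ definition above) =====
theorem resolve_voice_service_spec : Claim_equal_resolve_voice_service := by
  intro language_map lang_code _
  unfold Spec_resolve_voice_service resolve_voice_service resolve_voice_service_alt
  simp only [pvFoldPair, pvLoopExact_eq_find?, pvLoopBase_eq_find?, pvGet?_firstwins,
    PySem.Dict.get?_empty, Option.none_or]
  cases (language_map.map Prod.snd).find? (fun c => pvKeyE c == some lang_code) with
  | some c => simp [pvOutA]
  | none =>
    cases hb : (language_map.map Prod.snd).find? (fun c =>
        pvKeyB c == ((PySem.Str.split? (if lang_code = "" then "" else lang_code) "-").getD []).headD "") with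
    | some c => simp [pvOutA]
    | none => simp
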